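-- pv_equiv track=rewrite | github.com/nbacodes/tselect | tselect/core/selector.py | map_files_to_components
-- ===== SOURCE A (Python) =====
-- from typing import List, Set, Dict
--
-- def map_files_to_components(changed_files: List[str], ownership: Dict) -> Set[str]:
--     affected = set()
--
--     for component, paths in ownership.items():
--         for changed in changed_files:
--             for p in paths:
--                 if changed.startswith(p):
--                     affected.add(component)
--
--     return affected
-- ===== SOURCE B (Python) =====
-- def map_files_to_components(changed_files, ownership):
--     # Collect every prefix of every changed file once, then test each
--     # ownership path by set membership instead of repeated startswith scans.
--     prefixes = set()
--     for f in changed_files: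
--         for i in range(len(f) + 1):
--             prefixes.add(f[:i])
--     return {c for c, paths in ownership.items() if any(p in prefixes for p in paths)}
-- ===== Notes on version B (the rewrite author's own statement) =====
-- stated objective: faster
-- what changed: B precomputes the set of all prefixes of the changed files once and then decides each component by hash-set membership of its paths, replacing A's triple nested startswith scan over components x files x paths.
import Mathlib
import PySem

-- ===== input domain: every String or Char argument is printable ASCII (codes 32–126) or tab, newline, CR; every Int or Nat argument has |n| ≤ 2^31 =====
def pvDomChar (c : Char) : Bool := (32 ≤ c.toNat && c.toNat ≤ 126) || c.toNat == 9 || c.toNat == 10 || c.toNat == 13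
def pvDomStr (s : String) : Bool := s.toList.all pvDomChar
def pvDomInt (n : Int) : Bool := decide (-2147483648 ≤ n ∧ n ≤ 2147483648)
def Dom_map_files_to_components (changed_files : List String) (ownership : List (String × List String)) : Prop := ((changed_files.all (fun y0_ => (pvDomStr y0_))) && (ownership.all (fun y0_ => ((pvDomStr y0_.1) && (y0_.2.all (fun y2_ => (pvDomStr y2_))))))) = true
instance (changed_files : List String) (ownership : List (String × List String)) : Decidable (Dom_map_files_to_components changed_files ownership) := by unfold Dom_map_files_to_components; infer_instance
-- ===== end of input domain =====

-- B replaces A's triple nested startswith scan by one precomputed set of all prefixes of the changed files,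
-- deciding each component by set membership: a different, measurably faster algorithm.


-- ===== PORT A =====
def map_files_to_components (changed_files : List String) (ownership : List (String × List String)) : List String :=
  (PySem.Dict.ofList ownership).items.foldl
    (fun affected cp =>
      changed_files.foldl
        (fun aff changed =>
          cp.2.foldl
            (fun aff p => if PySem.Str.startswith changed p then PySem.Set.add aff cp.1 else aff)
            aff)
        affected)
    PySem.Set.empty

-- ===== PORT B =====
-- prefixes = set(); for f in changed_files: for i in range(len(f)+1): prefixes.add(f[:i])
def pvPrefixes (changed_files : List String) : PySem.Set String :=
  changed_files.foldl
    (fun s f =>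
      (PySem.List.pyRange 0 ((PySem.Str.len f : Int) + 1) 1).foldl
        (fun s i => PySem.Set.add s (PySem.Str.slice f none (some i))) s)
    PySem.Set.empty

def map_files_to_components_alt (changed_files : List String) (ownership : List (String × List String)) : List String :=
  let prefixes := pvPrefixes changed_files
  PySem.Set.ofList
    (((PySem.Dict.ofList ownership).items.filter
        (fun cp => cp.2.any (fun p => PySem.Set.contains prefixes p))).map Prod.fst)

-- ===== PRECONDITION & SPEC =====
def Spec_map_files_to_components (changed_files : List String) (ownership : List (String × List String)) (out : List String) : Prop := out = map_files_to_components_alt changed_files ownership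
instance (changed_files : List String) (ownership : List (String × List String)) (out : List String) : Decidable (Spec_map_files_to_components changed_files ownership out) := by unfold Spec_map_files_to_components; infer_instance

-- ===== CLAIM (what is proved, stated in full; the proofs are below) =====
def Claim_equal_map_files_to_components : Prop := ∀ (changed_files : List String) (ownership : List (String × List String)), Dom_map_files_to_components changed_files ownership → Spec_map_files_to_components changed_files ownership (map_files_to_components changed_files ownership)

-- ===== LEMMAS AND PROOFS =====

theorem pv_add_idem {α : Type} [DecidableEq α] (s : PySem.Set α) (c : α) :
    PySem.Set.add (PySem.Set.add s c) c = PySem.Set.add s c := by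
  by_cases h : c ∈ s <;> simp [PySem.Set.add, PySem.Set.contains, h]

theorem pv_add_of_not_mem {α : Type} [DecidableEq α] (s : PySem.Set α) (c : α) (h : c ∉ s) :
    PySem.Set.add s c = s ++ [c] := by
  simp [PySem.Set.add, PySem.Set.contains, h]

-- a fold that conditionally adds one fixed element is a single conditional add
theorem pv_foldl_ite_add {α β : Type} [DecidableEq β] (l : List α) (P : α → Bool)
    (s : PySem.Set β) (c : β) :
    l.foldl (fun a x => if P x then PySem.Set.add a c else a) s =
      if l.any P then PySem.Set.add s c else s := by
  induction l generalizing s with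
  | nil => simp
  | cons x l ih =>
    by_cases h : P x = true
    · rw [List.foldl_cons, if_pos h, ih]
      have hany : (x :: l).any P = true := by simp [h]
      rw [if_pos hany]
      split_ifs with h2
      · exact pv_add_idem s c
      · rfl
    · simp [List.foldl_cons, h, ih]

theorem pv_foldl_ite_add_nodup {α β : Type} [DecidableEq β] (l : List (β × α)) (P : β × α → Bool)
    (s : PySem.Set β) (hnd : (l.map Prod.fst).Nodup) (hdisj : ∀ cp ∈ l, cp.1 ∉ s) :
    l.foldl (fun a cp => if P cp then PySem.Set.add a cp.1 else a) s =
      s ++ (l.filter P).map Prod.fst := by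
  induction l generalizing s with
  | nil => simp
  | cons cp l ih =>
    simp only [List.map_cons, List.nodup_cons] at hnd
    by_cases h : P cp = true
    · have hcp : cp.1 ∉ s := hdisj cp (by simp)
      have hstep : PySem.Set.add s cp.1 = s ++ [cp.1] := pv_add_of_not_mem s cp.1 hcp
      have hdisj' : ∀ q ∈ l, q.1 ∉ s ++ [cp.1] := by
        intro q hq
        have h1 : q.1 ∉ s := hdisj q (by simp [hq])
        have h2 : q.1 ≠ cp.1 := by
          intro he
          exact hnd.1 (he ▸ List.mem_map_of_mem hq)
        simp [h1, h2]
      rw [List.foldl_cons, if_pos h, hstep, ih (s ++ [cp.1]) hnd.2 hdisj']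
      simp [h]
    · have hdisj' : ∀ q ∈ l, q.1 ∉ s := fun q hq => hdisj q (by simp [hq])
      rw [List.foldl_cons, if_neg h, ih s hnd.2 hdisj']
      simp [h]

-- membership in the prefix set = some changed file starts with p
theorem pv_mem_prefixes (changed_files : List String) (p : String) :
    p ∈ pvPrefixes changed_files ↔
      ∃ f ∈ changed_files, PySem.Str.startswith f p = true := by
  unfold pvPrefixes
  induction changed_files using List.reverseRecOn with
  | nil => simp [PySem.Set.empty]
  | append_singleton l f ih =>
    rw [List.foldl_append, List.foldl_cons, List.foldl_nil]
    rw [PySem.Set.mem_foldl_add]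
    rw [ih]
    constructor
    · rintro (⟨g, hg, hgs⟩ | ⟨i, hi, rfl⟩)
      · exact ⟨g, by simp [hg], hgs⟩
      · refine ⟨f, by simp, ?_⟩
        rw [PySem.List.mem_pyRange_one] at hi
        obtain ⟨h0, hlt⟩ := hi
        obtain ⟨k, rfl⟩ := Int.eq_ofNat_of_zero_le h0
        simp only [PySem.Str.startswith_eq, PySem.Chars.startswith_iff]
        have : (PySem.Str.slice f none (some (k : Int))).toList = f.toList.take k := by
          simp [PySem.Str.slice, PySem.Chars.slice_eq_listSlice, PySem.List.slice_to_natCast]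
        rw [this]
        exact List.take_prefix k f.toList
    · rintro ⟨g, hg, hgs⟩
      rcases List.mem_append.mp hg with hgl | hgf
      · exact Or.inl ⟨g, hgl, hgs⟩
      · right
        simp only [List.mem_singleton] at hgf
        subst hgf
        simp only [PySem.Str.startswith_eq, PySem.Chars.startswith_iff] at hgs
        refine ⟨(p.length : Int), ?_, ?_⟩
        · rw [PySem.List.mem_pyRange_one]
          have h1 := hgs.length_le
          have h2 : p.toList.length = p.length := String.length_toList
          have h3 : g.toList.length = g.length := String.length_toList
          simp only [PySem.Str.len_eq]
          omega
        · have hL : (PySem.Str.slice g none (some (p.length : Int))).toList = g.toList.take p.length := by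
            simp [PySem.Str.slice, PySem.Chars.slice_eq_listSlice, PySem.List.slice_to_natCast]
          have hT : g.toList.take p.length = p.toList := by
            have := List.prefix_iff_eq_take.mp hgs
            rw [String.length_toList] at this
            exact this.symm
          apply String.toList_injective
          rw [hL, hT]

theorem pv_contains_prefixes (changed_files : List String) (p : String) :
    PySem.Set.contains (pvPrefixes changed_files) p =
      changed_files.any (fun f => PySem.Str.startswith f p) := by
  simp only [PySem.Set.contains]
  rw [Bool.eq_iff_iff]
  simp [pv_mem_prefixes, List.any_eq_true]

theorem pv_cond_eq (changed_files : List String) (ps : List String) :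
    (changed_files.any fun ch => ps.any fun p => PySem.Str.startswith ch p) =
      (ps.any fun p => PySem.Set.contains (pvPrefixes changed_files) p) := by
  rw [Bool.eq_iff_iff]
  simp only [List.any_eq_true, pv_contains_prefixes]
  constructor
  · rintro ⟨f, hf, p, hp, h⟩; exact ⟨p, hp, f, hf, h⟩
  · rintro ⟨p, hp, f, hf, h⟩; exact ⟨f, hf, p, hp, h⟩

-- ===== VERDICT (by name: the statement is the Claim_ definition above) =====
theorem map_files_to_components_spec : Claim_equal_map_files_to_components := by
  intro changed_files ownership _
  unfold Spec_map_files_to_components map_files_to_components map_files_to_components_alt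
  have hA : ∀ (items : List (String × List String)) (s : PySem.Set String),
      items.foldl
        (fun affected cp =>
          changed_files.foldl
            (fun aff changed =>
              cp.2.foldl
                (fun aff p => if PySem.Str.startswith changed p then PySem.Set.add aff cp.1 else aff)
                aff)
            affected)
        s =
      items.foldl
        (fun a cp => if (changed_files.any fun ch => cp.2.any fun p => PySem.Str.startswith ch p)
          then PySem.Set.add a cp.1 else a) s := by
    intro items s
    induction items generalizing s with
    | nil => rfl
    | cons cp l ih =>
      simp only [List.foldl_cons]
      rw [← ih]
      congr 1
      have hinner : ∀ (aff : PySem.Set String),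
          changed_files.foldl
            (fun aff changed =>
              cp.2.foldl
                (fun aff p => if PySem.Str.startswith changed p then PySem.Set.add aff cp.1 else aff)
                aff) aff
          = if (changed_files.any fun ch => cp.2.any fun p => PySem.Str.startswith ch p)
              then PySem.Set.add aff cp.1 else aff := by
        intro aff
        have hstep : ∀ aff changed,
            cp.2.foldl
              (fun aff p => if PySem.Str.startswith changed p then PySem.Set.add aff cp.1 else aff)
              aff
            = if (cp.2.any fun p => PySem.Str.startswith changed p) then PySem.Set.add aff cp.1 else aff :=
          fun aff changed => pv_foldl_ite_add cp.2 _ aff cp.1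
        calc changed_files.foldl _ aff
            = changed_files.foldl
                (fun aff ch => if (cp.2.any fun p => PySem.Str.startswith ch p)
                  then PySem.Set.add aff cp.1 else aff) aff := by
                  exact PySem.List.foldl_congr_mem changed_files _ _ aff
                    (fun a b _ => hstep a b)
          _ = _ := pv_foldl_ite_add changed_files _ aff cp.1
      exact hinner s
  rw [hA]
  have hnd : (((PySem.Dict.ofList ownership).items.map Prod.fst) : List String).Nodup := by
    have := PySem.Dict.nodup_keys_ofList (κ := String) (ν := List String) ownership
    simpa [PySem.Dict.keys] using this
  rw [pv_foldl_ite_add_nodup _ _ _ hnd (by simp [PySem.Set.empty])]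
  have hfilter :
      ((PySem.Dict.ofList ownership).items.filter
        (fun cp => changed_files.any fun ch => cp.2.any fun p => PySem.Str.startswith ch p)) =
      ((PySem.Dict.ofList ownership).items.filter
        (fun cp => cp.2.any fun p => PySem.Set.contains (pvPrefixes changed_files) p)) := by
    apply List.filter_congr
    intro cp _
    exact pv_cond_eq changed_files cp.2
  rw [hfilter]
  have hnd2 : (((PySem.Dict.ofList ownership).items.filter
        (fun cp => cp.2.any fun p => PySem.Set.contains (pvPrefixes changed_files) p)).map Prod.fst).Nodup :=
    hnd.sublist (List.Sublist.map Prod.fst List.filter_sublist)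
  rw [show (PySem.Set.empty : PySem.Set String) = ([] : List String) from rfl]
  rw [← PySem.Set.update_nil_left, PySem.Set.update_eq_append_of_disjoint _ _ hnd2 (by simp)]
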